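-- pv_equiv track=rewrite | github.com/KHAKhazeus/Scouter | scouter/env/game_logic.py | classify_set
-- ===== SOURCE A (Python) =====
-- from typing import Literal
--
-- SetType = Literal["match", "run", "invalid"]
--
-- def classify_set(values: list[int]) -> SetType:
--     """Classify a proposed shown set by its active values.
--
--     Rules:
--     - Single card: always valid (treat as both match and run; returned as "match"
--       so the strength comparison treats it as the higher type).
--     - 2+ cards: must be all equal ("match") OR strictly ascending/descending ("run").
--     """
--     if not values:
--         return "invalid"
--     if len(values) == 1:
--         return "match"
--     if all(v == values[0] for v in values):
--         return "match"
--     # Check strictly ascending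
--     if all(values[i] + 1 == values[i + 1] for i in range(len(values) - 1)):
--         return "run"
--     # Check strictly descending
--     if all(values[i] - 1 == values[i + 1] for i in range(len(values) - 1)):
--         return "run"
--     return "invalid"
-- ===== SOURCE B (Python) =====
-- def classify_set(values):
--     if not values:
--         return "invalid"
--     if len(values) == 1:
--         return "match"
--     diffs = {b - a for a, b in zip(values, values[1:])}
--     if diffs == {0}:
--         return "match"
--     if diffs == {1} or diffs == {-1}:
--         return "run"
--     return "invalid"
-- ===== Notes on version B (the rewrite author's own statement) =====
-- stated objective: simpler
-- what changed: Replaced A's three separate all()-scans (all-equal, strictly ascending, strictly descending) with one pass that builds the set of adjacent differences and classifies by comparing it with {0}, {1} and {-1}.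
import Mathlib
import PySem

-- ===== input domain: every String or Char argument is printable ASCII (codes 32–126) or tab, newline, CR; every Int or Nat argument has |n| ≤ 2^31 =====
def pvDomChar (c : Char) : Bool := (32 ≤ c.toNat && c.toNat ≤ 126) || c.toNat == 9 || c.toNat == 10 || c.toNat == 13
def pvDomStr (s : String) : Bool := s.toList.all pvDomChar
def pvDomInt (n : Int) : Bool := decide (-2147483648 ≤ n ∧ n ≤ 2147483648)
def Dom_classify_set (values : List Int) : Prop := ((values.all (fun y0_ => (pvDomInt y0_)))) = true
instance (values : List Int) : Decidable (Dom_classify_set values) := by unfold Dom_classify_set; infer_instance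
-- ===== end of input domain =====

-- B replaces A's three separate all()-scans with one pass building the set of adjacent
-- differences, then classifies by comparing that set with {0}, {1}, {-1} (objective: simpler).

-- ===== PORT A =====
def classify_set (values : List Int) : String :=
  if values = [] then "invalid"
  else if values.length = 1 then "match"
  else if values.all (fun v => v == PySem.List.pyGetD values 0 0) then "match"
  else if (PySem.List.pyRange 0 ((values.length : Int) - 1) 1).all
            (fun i => PySem.List.pyGetD values i 0 + 1 == PySem.List.pyGetD values (i + 1) 0) then "run"
  else if (PySem.List.pyRange 0 ((values.length : Int) - 1) 1).all
            (fun i => PySem.List.pyGetD values i 0 - 1 == PySem.List.pyGetD values (i + 1) 0) then "run"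
  else "invalid"

-- ===== PORT B =====
def classify_set_alt (values : List Int) : String :=
  if values = [] then "invalid"
  else if values.length = 1 then "match"
  else
    let diffs : PySem.Set Int :=
      PySem.Set.ofList ((values.zip (PySem.List.slice values (some 1) none)).map (fun p => p.2 - p.1))
    if PySem.Set.equal diffs (PySem.Set.ofList [0]) then "match"
    else if PySem.Set.equal diffs (PySem.Set.ofList [1]) || PySem.Set.equal diffs (PySem.Set.ofList [-1]) then "run"
    else "invalid"

-- ===== PRECONDITION & SPEC =====
def Spec_classify_set (values : List Int) (out : String) : Prop := out = classify_set_alt values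
instance (values : List Int) (out : String) : Decidable (Spec_classify_set values out) := by unfold Spec_classify_set; infer_instance

-- ===== CLAIM (what is proved, stated in full; the proofs are below) =====
def Claim_equal_classify_set : Prop := ∀ (values : List Int), Dom_classify_set values → Spec_classify_set values (classify_set values)

-- ===== LEMMAS AND PROOFS =====

theorem index_loop_nat (xs : List Int) (f : Int → Int → Bool) :
    (List.range (xs.length - 1)).all (fun k => f (xs.getD k 0) (xs.getD (k+1) 0))
      = (xs.zip (xs.drop 1)).all (fun p => f p.1 p.2) := by
  induction xs with
  | nil => simp
  | cons a t ih =>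
    cases t with
    | nil => simp
    | cons b t' =>
      simp only [List.length_cons, Nat.add_sub_cancel] at ih ⊢
      rw [List.range_succ_eq_map]
      simp only [List.all_cons, List.all_map, Function.comp_def, List.getD_cons_zero,
        List.getD_cons_succ, List.drop_succ_cons, List.drop_zero, List.zip_cons_cons,
        Nat.succ_eq_add_one]
      simp only [List.drop_one, List.tail_cons, List.getD_cons_succ] at ih
      rw [ih]

theorem index_loop_eq_zip (xs : List Int) (f : Int → Int → Bool) :
    (PySem.List.pyRange 0 ((xs.length : Int) - 1) 1).all
        (fun i => f (PySem.List.pyGetD xs i 0) (PySem.List.pyGetD xs (i + 1) 0))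
      = (xs.zip (xs.drop 1)).all (fun p => f p.1 p.2) := by
  rw [PySem.List.pyRange_one]
  have hlen : ((xs.length : Int) - 1 - 0).toNat = xs.length - 1 := by omega
  rw [hlen, List.all_map]
  rw [← index_loop_nat xs f]
  refine List.all_congr rfl ?_
  intro k
  have h2 : ((k : Int) + 1) = (((k + 1 : Nat)) : Int) := by push_cast; ring
  simp only [Function.comp_apply, zero_add]
  rw [h2, PySem.List.pyGetD_natCast, PySem.List.pyGetD_natCast]

theorem all_eq_head_aux (rest : List Int) : ∀ (v : Int),
    (rest.all (fun x => x == v) = true ↔ ∀ p ∈ (v :: rest).zip rest, p.2 - p.1 = 0) := by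
  induction rest with
  | nil => intro v; simp
  | cons b t ih =>
    intro v
    simp only [List.all_cons, List.zip_cons_cons, List.mem_cons, Bool.and_eq_true, beq_iff_eq]
    constructor
    · rintro ⟨hb, ht⟩ p hp
      rcases hp with rfl | hp
      · simp [hb]
      · subst hb
        exact ((ih b).mp ht) p hp
    · intro h
      have hb : b - v = 0 := h (v, b) (Or.inl rfl)
      have hb' : b = v := by omega
      subst hb'
      exact ⟨rfl, (ih b).mpr (fun p hp => h p (Or.inr hp))⟩

theorem set_equal_singleton (d : List Int) (hd : d ≠ []) (c : Int) :
    PySem.Set.equal (PySem.Set.ofList d) (PySem.Set.ofList [c]) = true ↔ (∀ x ∈ d, x = c) := by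
  rw [PySem.Set.equal_iff]
  constructor
  · intro h x hx
    have := (h x).mp (by simpa [PySem.Set.mem_ofList] using hx)
    simpa [PySem.Set.mem_ofList] using this
  · intro hall x
    simp only [PySem.Set.mem_ofList, List.mem_singleton]
    constructor
    · intro hx; exact hall x hx
    · intro hx
      subst hx
      cases d with
      | nil => exact absurd rfl hd
      | cons a t =>
        have := hall a (by simp)
        subst this
        simp

theorem classify_eq (values : List Int) : classify_set values = classify_set_alt values := by
  unfold classify_set classify_set_alt
  by_cases hnil : values = []
  · simp [hnil]
  · simp only [if_neg hnil]
    by_cases h1 : values.length = 1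
    · simp [h1]
    · simp only [if_neg h1]
      obtain ⟨a, rest, rfl⟩ : ∃ a rest, values = a :: rest := by
        cases values with
        | nil => exact absurd rfl hnil
        | cons a rest => exact ⟨a, rest, rfl⟩
      set xs := a :: rest with hxs
      have hslice : PySem.List.slice xs (some 1) none = xs.drop 1 := PySem.List.slice_from xs (by norm_num)
      rw [hslice]
      set d := (xs.zip (xs.drop 1)).map (fun p => p.2 - p.1) with hdd
      have hdne : d ≠ [] := by
        rw [hdd]
        cases rest with
        | nil => simp [hxs] at h1
        | cons b t => simp [hxs]
      -- match condition
      have hm : (xs.all (fun v => v == PySem.List.pyGetD xs 0 0) = true)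
          ↔ PySem.Set.equal (PySem.Set.ofList d) (PySem.Set.ofList [0]) = true := by
        rw [set_equal_singleton d hdne 0]
        have h0 : PySem.List.pyGetD xs 0 0 = a := by simp [hxs, PySem.List.pyGetD]
        rw [h0, hxs]
        simp only [List.all_cons, Bool.and_eq_true, beq_iff_eq, true_and]
        rw [all_eq_head_aux rest a]
        constructor
        · intro h x hx
          simp only [hdd, hxs, List.mem_map] at hx
          obtain ⟨p, hp, rfl⟩ := hx
          have := h p (by simpa [List.drop_one] using hp)
          omega
        · intro h p hp
          have := h (p.2 - p.1) (by simp only [hdd, hxs, List.mem_map]; exact ⟨p, by simpa [List.drop_one] using hp, rfl⟩)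
          omega
      -- run conditions
      have hasc : ((PySem.List.pyRange 0 ((xs.length : Int) - 1) 1).all
            (fun i => PySem.List.pyGetD xs i 0 + 1 == PySem.List.pyGetD xs (i + 1) 0) = true)
          ↔ PySem.Set.equal (PySem.Set.ofList d) (PySem.Set.ofList [1]) = true := by
        rw [index_loop_eq_zip xs (fun x y => x + 1 == y), set_equal_singleton d hdne 1]
        simp only [hdd, List.all_eq_true, List.forall_mem_map, beq_iff_eq]
        constructor
        · intro h p hp; have := h p hp; omega
        · intro h p hp; have := h p hp; omega
      have hdesc : ((PySem.List.pyRange 0 ((xs.length : Int) - 1) 1).all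
            (fun i => PySem.List.pyGetD xs i 0 - 1 == PySem.List.pyGetD xs (i + 1) 0) = true)
          ↔ PySem.Set.equal (PySem.Set.ofList d) (PySem.Set.ofList [-1]) = true := by
        rw [index_loop_eq_zip xs (fun x y => x - 1 == y), set_equal_singleton d hdne (-1)]
        simp only [hdd, List.all_eq_true, List.forall_mem_map, beq_iff_eq]
        constructor
        · intro h p hp; have := h p hp; omega
        · intro h p hp; have := h p hp; omega
      by_cases hM : xs.all (fun v => v == PySem.List.pyGetD xs 0 0) = true
      · rw [if_pos hM, if_pos (hm.mp hM)]
      · rw [if_neg hM, if_neg (fun h => hM (hm.mpr h))]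
        by_cases hA : (PySem.List.pyRange 0 ((xs.length : Int) - 1) 1).all
            (fun i => PySem.List.pyGetD xs i 0 + 1 == PySem.List.pyGetD xs (i + 1) 0) = true
        · rw [if_pos hA, if_pos (by rw [Bool.or_eq_true]; exact Or.inl (hasc.mp hA))]
        · rw [if_neg hA]
          by_cases hD : (PySem.List.pyRange 0 ((xs.length : Int) - 1) 1).all
              (fun i => PySem.List.pyGetD xs i 0 - 1 == PySem.List.pyGetD xs (i + 1) 0) = true
          · rw [if_pos hD, if_pos (by rw [Bool.or_eq_true]; exact Or.inr (hdesc.mp hD))]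
          · rw [if_neg hD, if_neg (by
              rw [Bool.or_eq_true]
              rintro (h | h)
              · exact hA (hasc.mpr h)
              · exact hD (hdesc.mpr h))]

-- ===== VERDICT (by name: the statement is the Claim_ definition above) =====
theorem classify_set_spec : Claim_equal_classify_set := by
  intro values _
  unfold Spec_classify_set
  exact classify_eq values
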